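-- pv_equiv track=rewrite | github.com/naveen04561/ArtificialIntelligencePrograms | k_sat.py | revLexi
-- ===== SOURCE A (Python) =====
-- def revLexi(seq):
--     max = True
--     pos = len(seq)
--     sett = 1
--     pos-=1
--     while pos>=0 and (max or not(seq[pos])):
--         if seq[pos]:
--             sett += 1
--         else:
--             max = False
--         pos-=1
--     if pos<0:
--         return False
--     seq[pos] = 0
--     pos+=1
--     while pos < len(seq):
--         seq[pos] = 1 if sett > 0 else 0
--         sett -= 1
--         pos+=1
--     return True
-- ===== SOURCE B (Python) =====
-- def revLexi(seq):
--     # find the last index i with seq[i] truthy and seq[i+1] falsy (the pivot)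
--     i = -1
--     for k, (a, b) in enumerate(zip(seq, seq[1:])):
--         if a and not b:
--             i = k
--     if i < 0:
--         return False
--     # ones to pack right after the pivot: ones in the suffix, plus one
--     count = 1 + sum(1 for x in seq[i + 1:] if x)
--     seq[i:] = [0] + [1] * count + [0] * (len(seq) - i - 1 - count)
--     return True
-- ===== Notes on version B (the rewrite author's own statement) =====
-- stated objective: simpler
-- what changed: A's single right-to-left while loop that interleaves flag tracking, ones counting and the pivot test is replaced by a forward scan for the last adjacent (truthy, falsy) pair, a suffix sum, and one slice assignment that rewrites the tail.
import Mathlib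
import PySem

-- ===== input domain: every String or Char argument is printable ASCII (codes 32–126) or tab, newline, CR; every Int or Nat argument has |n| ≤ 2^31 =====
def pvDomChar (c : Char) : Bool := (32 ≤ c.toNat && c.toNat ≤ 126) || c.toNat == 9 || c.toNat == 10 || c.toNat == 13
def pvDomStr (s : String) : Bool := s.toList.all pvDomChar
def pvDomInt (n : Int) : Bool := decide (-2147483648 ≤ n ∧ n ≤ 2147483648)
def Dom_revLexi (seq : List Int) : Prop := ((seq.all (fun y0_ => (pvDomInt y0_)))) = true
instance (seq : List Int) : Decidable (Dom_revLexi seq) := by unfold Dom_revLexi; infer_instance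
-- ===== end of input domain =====

-- B replaces A's interleaved right-to-left scan by a forward pivot search plus a suffix
-- sum and one slice rewrite (objective: simpler). Both Pythons mutate `seq` in place
-- (identically); the ports model the returned Bool only.

-- ===== PORT A =====
-- A's while loop walks pos from len(seq)-1 down to 0 reading seq[pos]; this is the
-- structural recursion over seq.reverse with the same state (max, sett).  The second
-- while loop only rewrites the list and never changes the returned value, so the
-- Bool-valued port ends after the scan.
def revLexiLoop (mx : Bool) (sett : Int) : List Int → Bool
  | [] => false                       -- pos < 0 : return False
  | x :: rest =>
    if mx || x == 0 then              -- while pos>=0 and (max or not seq[pos])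
      if x != 0 then revLexiLoop mx (sett + 1) rest
      else revLexiLoop false sett rest
    else true                         -- pivot found: fill loop runs, return True

def revLexi (seq : List Int) : Bool := revLexiLoop true 1 seq.reverse

-- ===== PORT B =====
-- Source B: one forward pass over enumerate(zip(seq, seq[1:])) keeping the last pivot
-- index; i < 0 means no pivot → False, otherwise True (the suffix sum and slice
-- assignment only mutate the list and do not affect the returned Bool).
def revLexi_alt (seq : List Int) : Bool :=
  if (PySem.List.enumerate (seq.zip (seq.drop 1)) 0).foldl
      (fun acc kp => if kp.2.1 ≠ 0 ∧ kp.2.2 = 0 then kp.1 else acc) (-1) < 0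
  then false else true

-- ===== PRECONDITION & SPEC =====
def Spec_revLexi (seq : List Int) (out : Bool) : Prop := out = revLexi_alt seq
instance (seq : List Int) (out : Bool) : Decidable (Spec_revLexi seq out) := by unfold Spec_revLexi; infer_instance

-- ===== CLAIM (what is proved, stated in full; the proofs are below) =====
def Claim_equal_revLexi : Prop := ∀ (seq : List Int), Dom_revLexi seq → Spec_revLexi seq (revLexi seq)

-- ===== LEMMAS AND PROOFS =====

-- the Bool both sides compute: some adjacent pair (nonzero, zero) exists
def pairAny (l : List Int) : Bool :=
  (l.zip (l.drop 1)).any (fun pq => pq.1 != 0 && pq.2 == 0)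

lemma loop_false (r : List Int) (sett : Int) :
    revLexiLoop false sett r = r.any (fun x => x != 0) := by
  induction r generalizing sett with
  | nil => rfl
  | cons x rest ih =>
    by_cases hx : x = 0 <;> simp [revLexiLoop, hx, ih]

lemma loop_true (r : List Int) (sett : Int) :
    revLexiLoop true sett r = (r.dropWhile (fun x => x != 0)).any (fun x => x != 0) := by
  induction r generalizing sett with
  | nil => rfl
  | cons x rest ih =>
    by_cases hx : x = 0 <;>
      simp [revLexiLoop, hx, ih, loop_false]

lemma pairAny_of_zero (l : List Int) (y : Int) (hy : y ≠ 0) (hz : (0:Int) ∈ l) :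
    pairAny (y :: l) = true := by
  induction l generalizing y with
  | nil => simp at hz
  | cons z l' ih =>
    by_cases hzz : z = 0
    · simp [pairAny, hzz, hy]
    · have hz' : (0:Int) ∈ l' := by
        rcases List.mem_cons.1 hz with h | h
        · exact absurd h.symm hzz
        · exact h
      have := ih z hzz hz'
      simp only [pairAny, List.zip_cons_cons, List.drop_succ_cons, List.drop_zero,
        List.any_cons] at this ⊢
      simp [this]

lemma pairAny_of_noZero (l : List Int) (h : ∀ b ∈ l, b ≠ (0:Int)) :
    pairAny l = false := by
  induction l with
  | nil => rfl
  | cons x l' ih =>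
    cases l' with
    | nil => rfl
    | cons y l'' =>
      have hy : y ≠ 0 := h y (by simp)
      have := ih (fun b hb => h b (List.mem_cons_of_mem _ hb))
      simp only [pairAny, List.zip_cons_cons, List.drop_succ_cons, List.drop_zero,
        List.any_cons] at this ⊢
      simp [hy, this]

lemma bridge (seq : List Int) :
    (seq.reverse.dropWhile (fun x => x != 0)).any (fun x => x != 0) = pairAny seq := by
  induction seq with
  | nil => rfl
  | cons x l ih =>
    by_cases hz : (0:Int) ∈ l
    · have hne : l.reverse.dropWhile (fun x : Int => x != 0) ≠ [] := by
        intro hnil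
        have := (List.dropWhile_eq_nil_iff).1 hnil (x := 0) (by simpa using hz)
        simp at this
      have hdrop : ((l.reverse ++ [x]).dropWhile (fun x : Int => x != 0))
          = l.reverse.dropWhile (fun x : Int => x != 0) ++ [x] := by
        rw [List.dropWhile_append]
        simp [List.isEmpty_iff, hne]
      have hL : (((x :: l).reverse.dropWhile (fun x : Int => x != 0)).any (fun x => x != 0))
          = (pairAny l || (x != 0)) := by
        rw [List.reverse_cons, hdrop, List.any_append, ih]
        simp
      rw [hL]
      obtain ⟨y, l', rfl⟩ : ∃ y l', l = y :: l' := by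
        cases l with
        | nil => simp at hz
        | cons y l' => exact ⟨y, l', rfl⟩
      have hR : pairAny (x :: y :: l') = ((x != 0 && y == 0) || pairAny (y :: l')) := by
        simp [pairAny]
      rw [hR]
      by_cases hx : x = 0
      · simp [hx]
      · by_cases hy : y = 0
        · simp [hy, Bool.or_comm]
        · have h0 : (0:Int) ∈ l' := by
            rcases List.mem_cons.1 hz with h | h
            · exact absurd h.symm hy
            · exact h
          simp [pairAny_of_zero l' y hy h0]
    · have hall : ∀ b ∈ l, b ≠ (0:Int) := fun b hb hb0 => hz (hb0 ▸ hb)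
      have hnil : l.reverse.dropWhile (fun x : Int => x != 0) = [] := by
        rw [List.dropWhile_eq_nil_iff]
        intro a ha
        simpa using hall a (by simpa using ha)
      have hdrop : ((l.reverse ++ [x]).dropWhile (fun x : Int => x != 0))
          = [x].dropWhile (fun x : Int => x != 0) := by
        rw [List.dropWhile_append]
        simp [hnil]
      have hL : (((x :: l).reverse.dropWhile (fun x : Int => x != 0)).any (fun x => x != 0))
          = false := by
        rw [List.reverse_cons, hdrop]
        by_cases hx : x = 0 <;> simp [hx]
      rw [hL]
      cases l with
      | nil => simp [pairAny]
      | cons y l' =>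
        have hy : y ≠ 0 := hall y (by simp)
        have hR : pairAny (x :: y :: l') = ((x != 0 && y == 0) || pairAny (y :: l')) := by
          simp [pairAny]
        rw [hR, pairAny_of_noZero (y :: l') hall]
        simp [hy]

lemma any_enumerate {α : Type} (l : List α) (s : Int) (q : α → Bool) :
    (PySem.List.enumerate l s).any (fun kp => q kp.2) = l.any q := by
  induction l generalizing s with
  | nil => rfl
  | cons x l' ih => simp [PySem.List.enumerate_cons, ih]

lemma fold_neg (l : List (Int × (Int × Int))) (acc : Int)
    (hnn : ∀ kp ∈ l, 0 ≤ kp.1) :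
    (l.foldl (fun acc kp => if kp.2.1 ≠ 0 ∧ kp.2.2 = 0 then kp.1 else acc) acc < 0)
      ↔ (acc < 0 ∧ l.any (fun kp => kp.2.1 != 0 && kp.2.2 == 0) = false) := by
  induction l generalizing acc with
  | nil => simp
  | cons kp l' ih =>
    have hk : 0 ≤ kp.1 := hnn kp (by simp)
    have ih' := ih (if kp.2.1 ≠ 0 ∧ kp.2.2 = 0 then kp.1 else acc)
      (fun q hq => hnn q (List.mem_cons_of_mem _ hq))
    by_cases hc : kp.2.1 ≠ 0 ∧ kp.2.2 = 0
    · simp only [List.foldl_cons, if_pos hc] at ih' ⊢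
      rw [ih']
      constructor
      · rintro ⟨h1, _⟩; omega
      · rintro ⟨_, h2⟩
        simp only [List.any_cons, Bool.or_eq_false_iff] at h2
        have : (kp.2.1 != 0 && kp.2.2 == 0) = true := by
          simp [hc.1, hc.2]
        simp [this] at h2
    · simp only [List.foldl_cons, if_neg hc] at ih' ⊢
      rw [ih']
      have : (kp.2.1 != 0 && kp.2.2 == 0) = false := by
        by_cases h1 : kp.2.1 = 0 <;> simp [h1] at hc ⊢
        · simp [hc]
      simp [this]

lemma alt_eq_pairAny (seq : List Int) : revLexi_alt seq = pairAny seq := by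
  unfold revLexi_alt
  have hnn : ∀ kp ∈ PySem.List.enumerate (seq.zip (seq.drop 1)) 0, 0 ≤ kp.1 := by
    intro kp hkp
    rw [PySem.List.mem_enumerate_iff] at hkp
    obtain ⟨k, hk, rfl⟩ := hkp
    simp
  have hfold := fold_neg (PySem.List.enumerate (seq.zip (seq.drop 1)) 0) (-1) hnn
  have hany : (PySem.List.enumerate (seq.zip (seq.drop 1)) 0).any
        (fun kp => kp.2.1 != 0 && kp.2.2 == 0)
      = (seq.zip (seq.drop 1)).any (fun pq => pq.1 != 0 && pq.2 == 0) :=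
    any_enumerate (seq.zip (seq.drop 1)) 0 (fun pq => pq.1 != 0 && pq.2 == 0)
  by_cases hp : pairAny seq = true
  · have hnl : ¬ ((PySem.List.enumerate (seq.zip (seq.drop 1)) 0).foldl
        (fun acc kp => if kp.2.1 ≠ 0 ∧ kp.2.2 = 0 then kp.1 else acc) (-1) < 0) := by
      rw [hfold, hany]
      unfold pairAny at hp
      rintro ⟨-, h2⟩
      rw [hp] at h2
      exact Bool.noConfusion h2
    rw [if_neg hnl, hp]
  · have hp' : pairAny seq = false := by simpa using hp
    have hl : (PySem.List.enumerate (seq.zip (seq.drop 1)) 0).foldl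
        (fun acc kp => if kp.2.1 ≠ 0 ∧ kp.2.2 = 0 then kp.1 else acc) (-1) < 0 := by
      rw [hfold, hany]
      unfold pairAny at hp'
      exact ⟨by norm_num, hp'⟩
    rw [if_pos hl, hp']

-- ===== VERDICT (by name: the statement is the Claim_ definition above) =====
theorem revLexi_spec : Claim_equal_revLexi := by
  intro seq _
  unfold Spec_revLexi revLexi
  rw [loop_true, bridge, alt_eq_pairAny]
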